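-- pv_equiv track=rewrite | github.com/loopy-dev/algorithm-v2 | programmers/lv2/귤_고르기.py | solution
-- ===== SOURCE A (Python) =====
-- def solution(k, tangerine):
--     cache = {}
--     for i in range(len(tangerine)):
--         size = tangerine[i]
--         cache[size] = cache.get(size, 0) + 1
--
--     arr = []
--     for key, value in cache.items():
--         arr.append((key, value))
--
--     # 숫자가 많은 순서대로 정렬
--     arr.sort(key=lambda x: -x[1])
--
--     s = 0
--     for i in range(len(arr)):
--         s += arr[i][1]
--
--         if s >= k:
--             return i + 1
--
--     return len(arr)
-- ===== SOURCE B (Python) =====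
-- def solution(k, tangerine):
--     # counting sort over frequency values (each count is in [1, n]) instead of comparison sort
--     freq = {}
--     for t in tangerine:
--         freq[t] = freq.get(t, 0) + 1
--     n = len(tangerine)
--     bucket = [0] * (n + 1)  # bucket[c] = number of distinct sizes occurring exactly c times
--     for c in freq.values():
--         bucket[c] += 1
--     s = 0
--     taken = 0
--     for c in range(n, 0, -1):
--         for _ in range(bucket[c]):
--             s += c
--             taken += 1
--             if s >= k:
--                 return taken
--     return taken
-- ===== Notes on version B (the rewrite author's own statement) =====
-- stated objective: alternative
-- what changed: Replaces the comparison sort of (size,count) pairs by a counting-sort bucket indexed by frequency value (counts are bounded by n), traversed from n down to 1 with a greedy running sum.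
import Mathlib
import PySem

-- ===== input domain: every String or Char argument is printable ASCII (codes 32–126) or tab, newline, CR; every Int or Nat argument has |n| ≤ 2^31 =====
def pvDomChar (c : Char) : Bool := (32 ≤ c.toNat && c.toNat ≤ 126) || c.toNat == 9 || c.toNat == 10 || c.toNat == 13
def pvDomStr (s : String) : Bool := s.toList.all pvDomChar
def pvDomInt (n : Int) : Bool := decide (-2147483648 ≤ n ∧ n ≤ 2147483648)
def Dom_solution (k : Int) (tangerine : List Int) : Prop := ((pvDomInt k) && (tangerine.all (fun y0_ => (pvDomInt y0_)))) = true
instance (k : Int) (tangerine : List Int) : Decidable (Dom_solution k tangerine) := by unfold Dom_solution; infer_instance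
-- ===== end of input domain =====

-- B replaces A's comparison sort of (size, count) pairs by a counting-sort bucket over the
-- frequency values (each count lies in [1, n]) traversed from n down to 1 (alternative algorithm).

-- ===== PORT A =====
-- for i in range(len(tangerine)): size = tangerine[i]; cache[size] = cache.get(size, 0) + 1
-- (tangerine[i] ported as pyGetD: the index is always in range here, so this is exact)
def solutionCache (tangerine : List Int) : PySem.Dict Int Int :=
  (PySem.List.pyRange 0 (PySem.List.len tangerine) 1).foldl
    (fun d i =>
      let size := PySem.List.pyGetD tangerine i 0
      d.insert size (d.getD size 0 + 1))
    PySem.Dict.empty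

-- s = 0; for i in range(len(arr)): s += arr[i][1]; if s >= k: return i + 1
-- return len(arr)   -- ported as structural recursion; when the list is exhausted i = len(arr)
def solutionLoop (k : Int) : Int → Int → List (Int × Int) → Int
  | _, i, [] => i
  | s, i, p :: rest =>
      let s' := s + p.2
      if s' ≥ k then i + 1 else solutionLoop k s' (i + 1) rest

def solution (k : Int) (tangerine : List Int) : Int :=
  let cache := solutionCache tangerine
  let arr := cache.items.foldl (fun a p => a ++ [(p.1, p.2)]) []
  let arrS := PySem.List.sorted arr (fun x => -x.2) false
  solutionLoop k 0 0 arrS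

-- ===== PORT B =====
-- inner loop: for _ in range(bucket[c]): s += c; taken += 1; if s >= k: return taken
-- (Sum.inl = early return, Sum.inr = the state handed back to the outer loop)
def altInner (k c : Int) : Nat → Int → Int → (Int ⊕ Int × Int)
  | 0, s, taken => Sum.inr (s, taken)
  | m + 1, s, taken =>
      let s' := s + c
      let t' := taken + 1
      if s' ≥ k then Sum.inl t' else altInner k c m s' t'

-- outer loop: for c in range(n, 0, -1)
def altOuter (k : Int) (bucket : List Int) : List Int → Int → Int → Int
  | [], _, taken => taken
  | c :: cs, s, taken =>
      match altInner k c (PySem.List.pyGetD bucket c 0).toNat s taken with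
      | Sum.inl ans => ans
      | Sum.inr (s', t') => altOuter k bucket cs s' t'

def solution_alt (k : Int) (tangerine : List Int) : Int :=
  let freq : PySem.Dict Int Int := tangerine.foldl (fun d t => d.insert t (d.getD t 0 + 1)) PySem.Dict.empty
  let n := tangerine.length
  -- bucket[c] += 1 ported as List.modify at c.toNat: every frequency c satisfies 1 ≤ c ≤ n,
  -- so the index is always in range and this is exact
  let bucket := freq.values.foldl (fun b c => b.modify c.toNat (· + 1))
      (List.replicate (n + 1) (0 : Int))
  altOuter k bucket (PySem.List.pyRange (n : Int) 0 (-1)) 0 0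

-- ===== PRECONDITION & SPEC =====
def Spec_solution (k : Int) (tangerine : List Int) (out : Int) : Prop := out = solution_alt k tangerine
instance (k : Int) (tangerine : List Int) (out : Int) : Decidable (Spec_solution k tangerine out) := by unfold Spec_solution; infer_instance

-- ===== CLAIM (what is proved, stated in full; the proofs are below) =====
def Claim_equal_solution : Prop := ∀ (k : Int) (tangerine : List Int), Dom_solution k tangerine → Spec_solution k tangerine (solution k tangerine)

-- ===== LEMMAS AND PROOFS =====

-- the common greedy scan: take counts in the given order; return `taken` + the 1-based position
-- of the first prefix (relative to running sum s) reaching k, or `taken` + length if never reached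
def runT (k : Int) : List Int → Int → Int → Int
  | [], _, taken => taken
  | c :: cs, s, taken => if s + c ≥ k then taken + 1 else runT k cs (s + c) (taken + 1)

lemma solutionLoop_eq_runT (k : Int) (l : List (Int × Int)) :
    ∀ s i, solutionLoop k s i l = runT k (l.map Prod.snd) s i := by
  induction l with
  | nil => intro s i; rfl
  | cons p rest ih =>
      intro s i
      simp only [solutionLoop, runT, List.map_cons]
      split_ifs with h <;> simp [ih]

lemma altInner_runT (k c : Int) (rest : List Int) :
    ∀ m s taken,
      (match altInner k c m s taken with
       | Sum.inl a => a
       | Sum.inr (s', t') => runT k rest s' t')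
      = runT k (List.replicate m c ++ rest) s taken := by
  intro m
  induction m with
  | zero => intro s taken; rfl
  | succ m ih =>
      intro s taken
      simp only [altInner, List.replicate_succ, List.cons_append, runT]
      split_ifs with h
      · rfl
      · exact ih (s + c) (taken + 1)

lemma altOuter_eq_runT (k : Int) (bucket : List Int) (cs : List Int) :
    ∀ s taken, altOuter k bucket cs s taken
      = runT k (cs.flatMap (fun c => List.replicate (PySem.List.pyGetD bucket c 0).toNat c)) s taken := by
  induction cs with
  | nil => intro s taken; rfl
  | cons c cs ih =>
      intro s taken
      simp only [altOuter, List.flatMap_cons]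
      rw [← altInner_runT k c _ _ s taken]
      cases h : altInner k c (PySem.List.pyGetD bucket c 0).toNat s taken with
      | inl a => rfl
      | inr p => cases p; simp [ih]

-- the bucket fold counts occurrences: after the fold, slot j holds b[j] + (count of j in l)
lemma bucket_getD (l : List Int) :
    ∀ (b : List Int), (∀ x ∈ l, 1 ≤ x ∧ x < (b.length : Int)) →
    ∀ j : Nat, j < b.length →
    (l.foldl (fun b c => b.modify c.toNat (· + 1)) b).getD j 0 = b.getD j 0 + (l.count (j : Int) : Int) := by
  induction l with
  | nil => intro b _ j hj; simp
  | cons x l ih =>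
      intro b hb j hj
      have hx := hb x (List.mem_cons_self)
      have hlen : (b.modify x.toNat (· + 1)).length = b.length := List.length_modify _ _ _
      have hrec := ih (b.modify x.toNat (· + 1))
        (by intro y hy; rw [hlen]; exact hb y (List.mem_cons_of_mem _ hy))
        j (by rw [hlen]; exact hj)
      simp only [List.foldl_cons]
      rw [hrec]
      have hget : (b.modify x.toNat (· + 1)).getD j 0
          = (if x.toNat = j then b.getD j 0 + 1 else b.getD j 0) := by
        rw [List.getD_eq_getElem _ _ (by rw [hlen]; exact hj), List.getD_eq_getElem _ _ hj]
        rw [List.getElem_modify]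
      rw [hget, List.count_cons]
      by_cases hxj : x = (j : Int)
      · rw [if_pos (by omega)]
        simp [hxj]
        ring
      · rw [if_neg (by omega)]
        simp [hxj]

-- every element the counting-sort traversal emits for range(n, 0, -1) is ≤ n
lemma mem_counts_le (cnt : Int → Nat) (n : Nat) (x : Int)
    (hx : x ∈ (PySem.List.pyRange (n : Int) 0 (-1)).flatMap (fun c => List.replicate (cnt c) c)) :
    x ≤ (n : Int) := by
  rcases List.mem_flatMap.mp hx with ⟨c, hc, hxc⟩
  have := (PySem.List.mem_pyRange_neg_one).mp hc
  have := List.eq_of_mem_replicate hxc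
  omega

-- the counting-sort traversal is nonincreasing
lemma counts_pairwise (cnt : Int → Nat) : ∀ (n : Nat),
    ((PySem.List.pyRange (n : Int) 0 (-1)).flatMap
      (fun c => List.replicate (cnt c) c)).Pairwise (fun a b => b ≤ a) := by
  intro n
  induction n with
  | zero => rw [PySem.List.pyRange_neg_one_eq_nil (by norm_num)]; simp
  | succ n ih =>
      rw [PySem.List.pyRange_neg_one_cons (by exact_mod_cast Nat.succ_pos n)]
      simp only [List.flatMap_cons]
      have hstep : ((n + 1 : Nat) : Int) - 1 = (n : Int) := by push_cast; ring
      rw [hstep]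
      refine List.pairwise_append.mpr ⟨List.pairwise_replicate.mpr (Or.inr le_rfl), ih, ?_⟩
      intro a ha b hb
      have hb' := mem_counts_le cnt n b hb
      have ha' := List.eq_of_mem_replicate ha
      omega

-- the counting-sort traversal is a permutation of the counted values
lemma counts_perm : ∀ (n : Nat) (vals : List Int), (∀ x ∈ vals, 1 ≤ x ∧ x ≤ (n : Int)) →
    ((PySem.List.pyRange (n : Int) 0 (-1)).flatMap
      (fun c => List.replicate (vals.count c) c)).Perm vals := by
  intro n
  induction n with
  | zero =>
      intro vals hv
      have hnil : vals = [] := by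
        apply List.eq_nil_iff_forall_not_mem.mpr
        intro x hx; have := hv x hx; omega
      rw [hnil, PySem.List.pyRange_neg_one_eq_nil (by norm_num)]
      simp
  | succ n ih =>
      intro vals hv
      rw [PySem.List.pyRange_neg_one_cons (by exact_mod_cast Nat.succ_pos n)]
      simp only [List.flatMap_cons]
      have hstep : ((n + 1 : Nat) : Int) - 1 = (n : Int) := by push_cast; ring
      rw [hstep]
      set a : Int := ((n + 1 : Nat) : Int) with ha
      set vals' := vals.filter (fun x => !(x == a)) with hvals'
      have hcong : (PySem.List.pyRange (n : Int) 0 (-1)).flatMap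
            (fun c => List.replicate (vals.count c) c)
          = (PySem.List.pyRange (n : Int) 0 (-1)).flatMap
            (fun c => List.replicate (vals'.count c) c) := by
        apply List.flatMap_congr
        intro c hc
        have hcr := (PySem.List.mem_pyRange_neg_one).mp hc
        have hcount : vals'.count c = vals.count c := by
          rw [hvals']
          refine List.count_filter ?_
          simp only [Bool.not_eq_eq_eq_not, Bool.not_true, beq_eq_false_iff_ne, ne_eq]
          omega
        rw [hcount]
      rw [hcong]
      have hperm' : ((PySem.List.pyRange (n : Int) 0 (-1)).flatMap
          (fun c => List.replicate (vals'.count c) c)).Perm vals' := by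
        apply ih
        intro x hx
        have hxm := List.mem_of_mem_filter hx
        have hxe := List.of_mem_filter hx
        simp only [Bool.not_eq_eq_eq_not, Bool.not_true, beq_eq_false_iff_ne, ne_eq] at hxe
        have := hv x hxm
        omega
      have hrepl : List.replicate (vals.count a) a = vals.filter (· == a) :=
        (List.filter_beq a).symm
      have htrans : (List.replicate (vals.count a) a ++
          (PySem.List.pyRange (n : Int) 0 (-1)).flatMap
            (fun c => List.replicate (vals'.count c) c)).Perm
          (vals.filter (· == a) ++ vals') := by
        rw [hrepl]; exact List.Perm.append_left _ hperm'
      refine htrans.trans ?_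
      rw [hvals']
      exact List.filter_append_perm _ vals

-- A's dict-building loop is Counter
lemma cache_eq_counter (t : List Int) : solutionCache t = PySem.Dict.counter t := by
  have h := PySem.List.foldl_pyRange_zero_pyGetD t 0
    (fun (d : PySem.Dict Int Int) (x : Int) => d.insert x (d.getD x 0 + 1)) PySem.Dict.empty
  exact h.trans (PySem.Dict.foldl_insert_getD_add_one_eq_counter t)

lemma foldl_append_pairs : ∀ (l acc : List (Int × Int)),
    l.foldl (fun a p => a ++ [(p.1, p.2)]) acc = acc ++ l := by
  intro l
  induction l with
  | nil => intro acc; simp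
  | cons p rest ih => intro acc; simp [ih]

-- the values of Counter(t) are the multiplicities: each in [1, len t]
lemma counter_values_bounds (t : List Int) :
    ∀ x ∈ (PySem.Dict.counter t).items.map Prod.snd, 1 ≤ x ∧ x ≤ (t.length : Int) := by
  intro x hx
  rw [PySem.Dict.items_counter] at hx
  simp only [List.map_map, List.mem_map] at hx
  rcases hx with ⟨kk, hk, hxe⟩
  have hmem : kk ∈ t := (PySem.Set.mem_ofList t kk).mp hk
  have h1 : 0 < t.count kk := List.count_pos_iff.mpr hmem
  have h2 : t.count kk ≤ t.length := List.count_le_length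
  simp only [Function.comp] at hxe
  subst hxe
  constructor <;> [exact_mod_cast h1; exact_mod_cast h2]

-- ===== final assembly =====
theorem solution_spec : Claim_equal_solution := by
  unfold Claim_equal_solution Spec_solution
  intro k t _
  set n := t.length with hn
  set vals := (PySem.Dict.counter t).items.map Prod.snd with hvals
  have hvb : ∀ x ∈ vals, 1 ≤ x ∧ x ≤ (n : Int) := counter_values_bounds t
  -- A's side reduces to runT over the sorted count list
  have hA : solution k t
      = runT k ((PySem.List.sorted ((PySem.Dict.counter t).items) (fun x => -x.2) false).map Prod.snd) 0 0 := by
    simp only [solution, cache_eq_counter, foldl_append_pairs, List.nil_append]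
    rw [solutionLoop_eq_runT]
  have hApw : ((PySem.List.sorted ((PySem.Dict.counter t).items) (fun x => -x.2) false).map
      Prod.snd).Pairwise (fun a b => b ≤ a) := by
    rw [List.pairwise_map]
    have := PySem.List.sorted_pairwise ((PySem.Dict.counter t).items) (fun x => -x.2)
    exact this.imp (fun {a b} h => by omega)
  have hAperm : ((PySem.List.sorted ((PySem.Dict.counter t).items) (fun x => -x.2) false).map
      Prod.snd).Perm vals := by
    rw [hvals]
    exact (PySem.List.sorted_perm _ _ _).map Prod.snd
  -- B's side reduces to runT over the counting-sort traversal
  have hfreq : t.foldl (fun d x => d.insert x (d.getD x 0 + 1))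
      (PySem.Dict.empty : PySem.Dict Int Int) = PySem.Dict.counter t :=
    PySem.Dict.foldl_insert_getD_add_one_eq_counter t
  have hvalsdef : (PySem.Dict.counter t).values = vals := by rw [hvals]; rfl
  have hB : solution_alt k t
      = runT k ((PySem.List.pyRange (n : Int) 0 (-1)).flatMap
          (fun c => List.replicate (vals.count c) c)) 0 0 := by
    simp only [solution_alt, hfreq, hvalsdef, ← hn]
    rw [altOuter_eq_runT]
    congr 1
    apply List.flatMap_congr
    intro c hc
    have hcr := (PySem.List.mem_pyRange_neg_one).mp hc
    have hvb' : ∀ x ∈ vals, 1 ≤ x ∧ x < ((List.replicate (n + 1) (0 : Int)).length : Int) := by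
      intro x hx
      have := hvb x hx
      simp only [List.length_replicate]
      push_cast
      omega
    have hjlt : c.toNat < (List.replicate (n + 1) (0 : Int)).length := by
      simp only [List.length_replicate]; omega
    have hget : PySem.List.pyGetD
        (vals.foldl (fun b c => b.modify c.toNat (· + 1)) (List.replicate (n + 1) (0 : Int))) c 0
        = (vals.count c : Int) := by
      rw [PySem.List.pyGetD_of_nonneg _ _ (show (0 : Int) ≤ c by omega)]
      rw [bucket_getD vals _ hvb' c.toNat hjlt]
      have hc' : ((c.toNat : Nat) : Int) = c := by omega
      rw [hc', List.getD_replicate _ (by simpa using hjlt)]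
      ring
    rw [hget, Int.toNat_natCast]
  have hBpw := counts_pairwise (fun c => vals.count c) n
  have hBperm := counts_perm n vals hvb
  -- the two count lists are equal: nonincreasing permutations of the same multiset
  have hEq : (PySem.List.sorted ((PySem.Dict.counter t).items) (fun x => -x.2) false).map Prod.snd
      = (PySem.List.pyRange (n : Int) 0 (-1)).flatMap (fun c => List.replicate (vals.count c) c) :=
    List.Perm.eq_of_pairwise (fun a b _ _ x y => le_antisymm y x)
      hApw hBpw (hAperm.trans hBperm.symm)
  rw [hA, hB, hEq]
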